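-- pv_equiv track=rewrite | github.com/Rubisk/Euler | euler_145.py | add_reverse
-- ===== SOURCE A (Python) =====
-- def add_reverse(n):
-- 	m = n + 0
-- 	digits = []
-- 	while m >= 1:
-- 		digits.append(m % 10)
-- 		m = int(m / 10)
-- 	ten_power = 1
-- 	for d in digits[::-1]:
-- 		n += d * ten_power
-- 		ten_power *= 10
-- 	return n
-- ===== SOURCE B (Python) =====
-- def add_reverse(n):
-- 	rev = 0
-- 	m = n
-- 	while m >= 1:
-- 		rev = rev * 10 + m % 10
-- 		m = int(m / 10)
-- 	return n + rev
-- ===== Notes on version B (the rewrite author's own statement) =====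
-- stated objective: simpler
-- what changed: Replaces A's two passes (build a digit list, then re-walk its reversal with an explicit power-of-ten accumulator) by one accumulating loop rev = rev*10 + m%10, returning n + rev with no intermediate list.
import Mathlib
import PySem

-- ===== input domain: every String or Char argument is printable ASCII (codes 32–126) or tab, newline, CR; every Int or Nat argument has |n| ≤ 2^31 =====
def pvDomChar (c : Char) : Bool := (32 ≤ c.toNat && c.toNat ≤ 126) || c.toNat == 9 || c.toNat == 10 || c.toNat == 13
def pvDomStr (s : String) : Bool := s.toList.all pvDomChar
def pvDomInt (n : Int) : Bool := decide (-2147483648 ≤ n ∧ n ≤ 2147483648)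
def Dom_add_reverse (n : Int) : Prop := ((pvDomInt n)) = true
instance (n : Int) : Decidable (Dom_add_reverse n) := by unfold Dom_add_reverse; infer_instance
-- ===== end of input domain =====

-- B replaces A's two passes (digit list + reversed re-walk with a power accumulator)
-- by one accumulating loop rev = rev*10 + m%10; objective: simpler.
-- int(m/10) is exact truncating division here (|n| ≤ 2^31 < 2^53): PySem.Int.truncdiv.

-- termination fact for the while-loops (cited by name in decreasing_by)
theorem pv_trunc_lt (m : Int) (h : 1 ≤ m) : (PySem.Int.truncdiv m 10).toNat < m.toNat := by
  simp [PySem.Int.truncdiv, Int.tdiv_eq_ediv_of_nonneg (by omega : (0:Int) ≤ m)]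
  omega

-- ===== PORT A =====
-- the first while-loop of A: digits of m, least significant first (list append = cons at tail of recursion)
def pvDigitsA (m : Int) : List Int :=
  if h : 1 ≤ m then PySem.Int.mod m 10 :: pvDigitsA (PySem.Int.truncdiv m 10) else []
termination_by m.toNat
decreasing_by exact pv_trunc_lt m h

-- second pass: for d in digits[::-1]: n += d * ten_power; ten_power *= 10
def add_reverse (n : Int) : Int :=
  (((pvDigitsA n).reverse).foldl (fun (st : Int × Int) d => (st.1 + d * st.2, st.2 * 10)) (n, 1)).1

-- ===== PORT B =====
-- B's single while-loop: rev = rev*10 + m%10; m = int(m/10)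
def pvRevLoop (rev m : Int) : Int :=
  if h : 1 ≤ m then pvRevLoop (rev * 10 + PySem.Int.mod m 10) (PySem.Int.truncdiv m 10) else rev
termination_by m.toNat
decreasing_by exact pv_trunc_lt m h

def add_reverse_alt (n : Int) : Int := n + pvRevLoop 0 n

-- ===== PRECONDITION & SPEC =====
def Spec_add_reverse (n : Int) (out : Int) : Prop := out = add_reverse_alt n
instance (n : Int) (out : Int) : Decidable (Spec_add_reverse n out) := by unfold Spec_add_reverse; infer_instance

-- ===== CLAIM (what is proved, stated in full; the proofs are below) =====
def Claim_equal_add_reverse : Prop := ∀ (n : Int), Dom_add_reverse n → Spec_add_reverse n (add_reverse n)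

-- ===== LEMMAS AND PROOFS =====

theorem pv_horner_shift (L : List Int) (r : Int) :
    L.foldl (fun a d => a * 10 + d) r = r * 10 ^ L.length + L.foldl (fun a d => a * 10 + d) 0 := by
  induction L generalizing r with
  | nil => simp
  | cons d t ih =>
    simp only [List.foldl_cons, List.length_cons]
    rw [ih (r * 10 + d), ih (0 * 10 + d)]
    ring

theorem pv_fold_pair (L : List Int) (a t : Int) :
    L.reverse.foldl (fun (st : Int × Int) d => (st.1 + d * st.2, st.2 * 10)) (a, t)
      = (a + t * L.foldl (fun a d => a * 10 + d) 0, t * 10 ^ L.length) := by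
  induction L generalizing a t with
  | nil => simp
  | cons d tl ih =>
    simp only [List.reverse_cons, List.foldl_append, List.foldl_cons, List.foldl_nil,
      List.length_cons, ih]
    rw [pv_horner_shift tl (0 * 10 + d), Prod.mk.injEq]
    constructor <;> ring

theorem pv_revloop_eq (m : Int) :
    ∀ rev, pvRevLoop rev m = (pvDigitsA m).foldl (fun a d => a * 10 + d) rev := by
  induction m using pvDigitsA.induct with
  | case1 m h ih =>
    intro rev
    rw [pvRevLoop, pvDigitsA]
    simp only [h, dite_true, List.foldl_cons]
    exact ih _
  | case2 m h =>
    intro rev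
    rw [pvRevLoop, pvDigitsA]
    simp [h]

-- ===== VERDICT (by name: the statement is the Claim_ definition above) =====
theorem add_reverse_spec : Claim_equal_add_reverse := by
  intro n _
  unfold Spec_add_reverse add_reverse add_reverse_alt
  rw [pv_fold_pair, pv_revloop_eq]
  rw [pv_horner_shift (pvDigitsA n) 0]
  ring
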